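-- pv_equiv track=rewrite | github.com/junrui-liu/coding-problems | codejam/jam.py | update
-- ===== SOURCE A (Python) =====
-- def group(xs, n):
--   res = []
--   while len(xs) > n:
--     res.append(xs[:n])
--     xs = xs[n:]
--   if len(xs) > 0:
--     res.append(xs)
--   return res
--
-- def update(msg, rpl, info, bsize):
--   if bsize == 2:
--     j = 1
--
--   msg, rpl, info, n_good, acc = group(msg, bsize), rpl, info, 0, []
--   while True:
--     if msg == []:
--       break
--     elif len(info) > 0 and n_good + info[0] >= bsize: # exhausted non-broken slots in the head block
--       acc.extend( [None] * len(msg[0]) )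
--       msg, rpl, info, n_good, acc = msg[1:], rpl, info[1:], 0, acc
--     elif msg[0] == []: # nothing else to match in the head block
--       msg, rpl, info, n_good, acc = msg[1:], rpl, info[1:], n_good, acc
--     elif len(rpl) == 0: # base case
--       acc.extend([None] * len([1 for block in msg for _ in block]))
--       break
--     else: # try to match
--       hd, tl = msg[0], msg[1:]
--       new_msg = [hd[1:]] + tl
--       if rpl[0] == hd[0]:
--         msg, rpl, info, n_good, acc =new_msg, rpl[1:], info, n_good+1, acc + [rpl[0]]
--       else: # found a broken slot
--         msg, rpl, info, n_good, acc =new_msg, rpl, info, n_good, acc + [None]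
--   match_res = acc
--   count_broken = lambda block: sum((1 for x in block if x is None))
--   return [count_broken(g) for g in group(match_res, bsize // 2)]
-- ===== SOURCE B (Python) =====
-- def _counts(match_res, half):
--     res = []
--     while match_res:
--         res.append(match_res[:half].count(None))
--         match_res = match_res[half:]
--     return res
--
--
-- def _process_block(block, after_len, rpl, info, ptr, ii, n_good, bsize, match_res):
--     """Consume one block. Returns (match_res, ptr, ii, n_good, early) where
--     early=True means rpl was exhausted and match_res is final (fully padded)."""
--     consumed = 0
--     for c in block:
--         if ii < len(info) and n_good + info[ii] >= bsize:
--             # budget exhausted: pad rest of block, pop info, reset counter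
--             match_res.extend([None] * (len(block) - consumed))
--             return match_res, ptr, ii + 1, 0, False
--         if ptr == len(rpl):
--             # replacement exhausted: pad everything that remains in msg
--             match_res.extend([None] * (len(block) - consumed + after_len))
--             return match_res, ptr, ii, n_good, True
--         if rpl[ptr] == c:
--             match_res.append(rpl[ptr])
--             ptr += 1
--             n_good += 1
--         else:
--             match_res.append(None)
--         consumed += 1
--     # block ended naturally: the budget check still pops info (and may reset)
--     if ii < len(info) and n_good + info[ii] >= bsize:
--         n_good = 0
--     return match_res, ptr, ii + 1, n_good, False
--
--
-- def update(msg, rpl, info, bsize):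
--     match_res, ptr, ii, n_good = [], 0, 0, 0
--     start = 0
--     while start < len(msg):
--         block = msg[start:start + bsize]
--         after_len = len(msg) - start - len(block)
--         match_res, ptr, ii, n_good, early = _process_block(
--             block, after_len, rpl, info, ptr, ii, n_good, bsize, match_res)
--         if early:
--             break
--         start += bsize
--     return _counts(match_res, bsize // 2)
-- ===== Notes on version B (the rewrite author's own statement) =====
-- stated objective: faster
-- what changed: Replaced A's while-True state machine over a pre-grouped list of blocks with shrinking rpl/info copies and quadratic 'acc + [x]' list copies by a single pass over the message in blocks that keeps integer pointers into rpl and info and appends to one result list in place.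
-- outside the precondition, e.g. on update([], [], [], 0): A returns [], B returns []; on update([], [], [], 1): A returns [], B returns []
import Mathlib
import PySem

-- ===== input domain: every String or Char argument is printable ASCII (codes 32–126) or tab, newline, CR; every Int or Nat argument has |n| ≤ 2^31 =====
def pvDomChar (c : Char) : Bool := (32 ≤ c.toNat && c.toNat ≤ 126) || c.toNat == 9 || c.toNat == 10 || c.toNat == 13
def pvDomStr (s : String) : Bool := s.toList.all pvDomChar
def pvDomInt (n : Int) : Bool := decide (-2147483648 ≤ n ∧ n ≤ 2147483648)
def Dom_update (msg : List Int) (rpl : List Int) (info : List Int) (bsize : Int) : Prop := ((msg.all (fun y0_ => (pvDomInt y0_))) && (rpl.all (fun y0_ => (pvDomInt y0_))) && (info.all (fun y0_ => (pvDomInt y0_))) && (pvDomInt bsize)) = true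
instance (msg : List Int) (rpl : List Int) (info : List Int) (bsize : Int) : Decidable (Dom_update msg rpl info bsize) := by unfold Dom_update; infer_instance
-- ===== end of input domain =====

-- B replaces A's while-True state machine (pre-grouped message, shrinking rpl/info lists,
-- quadratic 'acc + [x]' appends) by one pass over the message in blocks with integer
-- pointers into rpl and info; measurably faster by a constant factor (linear appends).

-- ===== PORT A =====
-- group(xs, n): while len(xs) > n: res.append(xs[:n]); xs = xs[n:]; then append nonempty rest.
-- The '1 ≤ n' conjunct only totalises the guard: for n < 1 the Python loop diverges
-- whenever it would be entered (outside Pre_update).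
def pyGroup {α : Type} (xs : List α) (n : Int) : List (List α) :=
  if h : 1 ≤ n ∧ n < (xs.length : Int) then
    PySem.List.slice xs none (some n) :: pyGroup (PySem.List.slice xs (some n) none) n
  else if 0 < xs.length then [xs] else []
termination_by xs.length
decreasing_by
  rw [PySem.List.slice_from xs (by omega)]
  simp only [List.length_drop]
  omega

-- the while-True loop of A, one constructor per iteration shape
def updateGo (bsize : Int) : List (List Int) → List Int → List Int → Int → List (Option Int) → List (Option Int)
  | [], _, _, _, acc => acc
  | b :: bs, rpl, info, n_good, acc =>
    if 0 < info.length ∧ bsize ≤ n_good + info.headD 0 then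
      updateGo bsize bs rpl info.tail 0 (acc ++ List.replicate b.length none)
    else if hb : b = [] then
      updateGo bsize bs rpl info.tail n_good acc
    else if rpl = [] then
      acc ++ List.replicate ((b :: bs).flatten.length) none
    else
      -- hd[0] / rpl[0] are headD (guarded: b ≠ [] and rpl ≠ [] here), hd[1:] is tail
      if rpl.headD 0 = b.headD 0 then
        updateGo bsize (b.tail :: bs) rpl.tail info (n_good + 1) (acc ++ [some (rpl.headD 0)])
      else
        updateGo bsize (b.tail :: bs) rpl info n_good (acc ++ [none])
termination_by m => m.flatten.length + m.length
decreasing_by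
  all_goals simp only [List.flatten_cons, List.length_append, List.length_cons,
    List.length_tail]
  all_goals rcases b with _ | ⟨x, xs⟩
  all_goals simp_all
  all_goals omega

def update (msg : List Int) (rpl : List Int) (info : List Int) (bsize : Int) : List Int :=
  -- 'if bsize == 2: j = 1' in A is dead code
  let matchRes := updateGo bsize (pyGroup msg bsize) rpl info 0 []
  -- count_broken g = sum(1 for x in g if x is None), i.e. the number of 'none's in g
  (pyGroup matchRes (PySem.Int.floordiv bsize 2)).map
    (fun g => ((g.countP (fun x => x == none) : Nat) : Int))

-- ===== PORT B =====
-- _process_block: consume one block; result (match_res, ptr, ii, n_good, early),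
-- early = true means rpl was exhausted and match_res is final (fully padded).
-- ptr/ii start at 0 and only grow, so they are carried as Nat; the guarded Python
-- reads rpl[ptr] / info[ii] are List.getD (exact: always in range when read).
def altBlock (rpl info : List Int) (bsize : Int) (afterLen : Nat) :
    List Int → Nat → Nat → Int → List (Option Int) →
    List (Option Int) × Nat × Nat × Int × Bool
  | [], ptr, ii, n_good, mres =>
      (mres, ptr, ii + 1,
       if ii < info.length ∧ bsize ≤ n_good + info.getD ii 0 then 0 else n_good, false)
  | c :: bs, ptr, ii, n_good, mres =>
      if ii < info.length ∧ bsize ≤ n_good + info.getD ii 0 then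
        (mres ++ List.replicate (bs.length + 1) none, ptr, ii + 1, 0, false)
      else if ptr = rpl.length then
        (mres ++ List.replicate (bs.length + 1 + afterLen) none, ptr, ii, n_good, true)
      else if rpl.getD ptr 0 = c then
        altBlock rpl info bsize afterLen bs (ptr + 1) ii (n_good + 1) (mres ++ [some (rpl.getD ptr 0)])
      else
        altBlock rpl info bsize afterLen bs ptr ii n_good (mres ++ [none])

-- the outer while of B: 'start += bsize' is recursion on the remaining suffix,
-- so msg[start:start+bsize] is the relative slice msgRest[:bsize].
-- The 'bsize < 1' disjunct only totalises the guard (Python B diverges there; outside Pre_update).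
def altGo (rpl info : List Int) (bsize : Int) (msgRest : List Int) (ptr ii : Nat)
    (n_good : Int) (mres : List (Option Int)) : List (Option Int) :=
  if h : msgRest = [] ∨ bsize < 1 then mres
  else
    -- block := msgRest[:bsize], rest := msgRest[bsize:] (inlined)
    match altBlock rpl info bsize (PySem.List.slice msgRest (some bsize) none).length
        (PySem.List.slice msgRest none (some bsize)) ptr ii n_good mres with
    | (mres', ptr', ii', n_good', early) =>
      if early then mres'
      else altGo rpl info bsize (PySem.List.slice msgRest (some bsize) none) ptr' ii' n_good' mres'
termination_by msgRest.length
decreasing_by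
  rw [PySem.List.slice_from msgRest (by omega)]
  simp only [List.length_drop]
  rcases msgRest with _ | ⟨x, xs⟩
  · simp at h
  · simp only [List.length_cons]; omega

-- _counts: while match_res: emit match_res[:half].count(None); match_res = match_res[half:].
-- The 'half < 1' disjunct only totalises the guard (Python B diverges there; outside Pre_update).
def altCounts (half : Int) (mres : List (Option Int)) : List Int :=
  if h : mres = [] ∨ half < 1 then []
  else
    ((PySem.List.count (PySem.List.slice mres none (some half)) none : Nat) : Int)
      :: altCounts half (PySem.List.slice mres (some half) none)
termination_by mres.length
decreasing_by
  rw [PySem.List.slice_from mres (by omega)]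
  simp only [List.length_drop]
  rcases mres with _ | ⟨x, xs⟩
  · simp at h
  · simp only [List.length_cons]; omega

def update_alt (msg : List Int) (rpl : List Int) (info : List Int) (bsize : Int) : List Int :=
  altCounts (PySem.Int.floordiv bsize 2) (altGo rpl info bsize msg 0 0 0 [])

-- ===== PRECONDITION & SPEC =====
-- Pre_update excludes bsize ≤ 1: A diverges on every such input except msg = [] with
-- bsize ∈ {0,1}, where both A and B return []; nothing with bsize ≥ 2 is excluded.
def Pre_update (msg : List Int) (rpl : List Int) (info : List Int) (bsize : Int) : Prop :=
  2 ≤ bsize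
instance (msg : List Int) (rpl : List Int) (info : List Int) (bsize : Int) : Decidable (Pre_update msg rpl info bsize) := by unfold Pre_update; infer_instance

def pvWitness_update : List Int × List Int × List Int × Int := ([1, 0, 2, 1], [1, 1], [1], 2)

def Spec_update (msg : List Int) (rpl : List Int) (info : List Int) (bsize : Int) (out : List Int) : Prop := out = update_alt msg rpl info bsize
instance (msg : List Int) (rpl : List Int) (info : List Int) (bsize : Int) (out : List Int) : Decidable (Spec_update msg rpl info bsize out) := by unfold Spec_update; infer_instance

-- ===== CLAIM (what is proved, stated in full; the proofs are below) =====
def Claim_equal_update : Prop := ∀ (msg : List Int) (rpl : List Int) (info : List Int) (bsize : Int), Dom_update msg rpl info bsize → Pre_update msg rpl info bsize → Spec_update msg rpl info bsize (update msg rpl info bsize)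

-- ===== LEMMAS AND PROOFS =====

theorem pyGroup_nil {α : Type} (n : Int) : pyGroup ([] : List α) n = [] := by
  unfold pyGroup
  simp
  omega

theorem pyGroup_cons {α : Type} (xs : List α) (n : Int) (hn : 1 ≤ n) (hxs : xs ≠ []) :
    pyGroup xs n = xs.take n.toNat :: pyGroup (xs.drop n.toNat) n := by
  have h0 : (0:Int) ≤ n := by omega
  rw [pyGroup]
  by_cases h : n < (xs.length : Int)
  · rw [dif_pos ⟨hn, h⟩, PySem.List.slice_to xs h0, PySem.List.slice_from xs h0]
  · rw [dif_neg (by tauto)]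
    have hlen : xs.length ≤ n.toNat := by omega
    rw [List.take_of_length_le hlen, List.drop_of_length_le hlen, pyGroup_nil]
    simp [List.length_pos_iff, hxs]

theorem pyGroup_flatten {α : Type} (n : Int) (hn : 1 ≤ n) (xs : List α) :
    (pyGroup xs n).flatten = xs := by
  by_cases hxs : xs = []
  · simp [hxs, pyGroup_nil]
  · rw [pyGroup_cons xs n hn hxs]
    have : (xs.drop n.toNat).length < xs.length := by
      simp only [List.length_drop]
      have : xs.length ≠ 0 := by simp [List.length_eq_zero_iff, hxs]
      omega
    rw [List.flatten_cons, pyGroup_flatten n hn (xs.drop n.toNat), List.take_append_drop]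
termination_by xs.length

theorem cond_iff (info : List Int) (ii : Nat) (bsize n_good : Int) :
    (0 < (info.drop ii).length ∧ bsize ≤ n_good + (info.drop ii).headD 0) ↔
    (ii < info.length ∧ bsize ≤ n_good + info.getD ii 0) := by
  by_cases hii : ii < info.length
  · rw [List.drop_eq_getElem_cons hii]
    simp
  · rw [List.drop_of_length_le (by omega)]
    simp; omega

theorem drop_tail {α : Type} (xs : List α) (i : Nat) : (xs.drop i).tail = xs.drop (i + 1) := by
  rw [List.tail_drop]

theorem altBlock_ptr_le (rpl info : List Int) (bsize : Int) (afterLen : Nat)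
    (block : List Int) (ptr ii : Nat) (n_good : Int) (mres : List (Option Int))
    (h : ptr ≤ rpl.length) :
    (altBlock rpl info bsize afterLen block ptr ii n_good mres).2.1 ≤ rpl.length := by
  induction block generalizing ptr ii n_good mres with
  | nil => simpa [altBlock]
  | cons c bs ih =>
    rw [altBlock]
    split_ifs with h1 h2 h3
    · simpa
    · simpa
    · exact ih (ptr + 1) ii (n_good + 1) _ (by omega)
    · exact ih ptr ii n_good _ h

-- one block of A's machine = one altBlock step plus the machine on the remaining blocks
theorem block_corr (rpl info : List Int) (bsize : Int) (block : List Int)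
    (bs : List (List Int)) (ptr ii : Nat) (n_good : Int) (acc : List (Option Int))
    (hptr : ptr ≤ rpl.length) :
    updateGo bsize (block :: bs) (rpl.drop ptr) (info.drop ii) n_good acc =
      (match altBlock rpl info bsize bs.flatten.length block ptr ii n_good acc with
       | (mres', ptr', ii', n_good', early) =>
         if early then mres'
         else updateGo bsize bs (rpl.drop ptr') (info.drop ii') n_good' mres') := by
  induction block generalizing ptr n_good acc with
  | nil =>
    rw [altBlock, updateGo]
    by_cases hc : ii < info.length ∧ bsize ≤ n_good + info.getD ii 0
    · rw [if_pos ((cond_iff info ii bsize n_good).2 hc), if_pos hc]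
      simp
    · rw [if_neg (fun hh => hc ((cond_iff info ii bsize n_good).1 hh)), if_neg hc]
      simp
  | cons c cs ih =>
    rw [altBlock, updateGo]
    by_cases hc : ii < info.length ∧ bsize ≤ n_good + info.getD ii 0
    · rw [if_pos ((cond_iff info ii bsize n_good).2 hc), if_pos hc]
      simp [List.replicate_succ']
    · rw [if_neg (fun hh => hc ((cond_iff info ii bsize n_good).1 hh)), if_neg hc]
      rw [dif_neg (by simp : ¬(c :: cs = []))]
      by_cases hp : ptr = rpl.length
      · rw [if_pos hp, if_pos (by rw [hp, List.drop_length] : rpl.drop ptr = [])]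
        simp only [List.flatten_cons, List.length_append, List.length_cons]
        rw [List.replicate_add]
        simp [List.replicate_succ', List.length_flatten]
      · have hplt : ptr < rpl.length := by omega
        have hdropne : rpl.drop ptr ≠ [] := by
          simp only [ne_eq, List.drop_eq_nil_iff, not_le]
          exact hplt
        have hhead : (rpl.drop ptr).headD 0 = rpl.getD ptr 0 := by
          rw [List.drop_eq_getElem_cons hplt, List.getD_eq_getElem rpl 0 hplt]; rfl
        have htail : (rpl.drop ptr).tail = rpl.drop (ptr + 1) := drop_tail rpl ptr
        rw [if_neg hp, if_neg hdropne, hhead]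
        by_cases hm : rpl.getD ptr 0 = c
        · rw [if_pos (by simpa using hm), if_pos hm]
          simp only [List.tail_cons, htail]
          exact ih (ptr + 1) (n_good + 1) _ (by omega)
        · rw [if_neg (by simpa using hm), if_neg hm]
          simp only [List.tail_cons]
          exact ih ptr n_good _ hptr

-- B's outer loop = A's machine on the grouped message, dropped lists ↔ pointers
theorem go_corr (rpl info : List Int) (bsize : Int) (hb : 1 ≤ bsize)
    (msgRest : List Int) (ptr ii : Nat) (n_good : Int) (mres : List (Option Int))
    (hptr : ptr ≤ rpl.length) :
    altGo rpl info bsize msgRest ptr ii n_good mres =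
      updateGo bsize (pyGroup msgRest bsize) (rpl.drop ptr) (info.drop ii) n_good mres := by
  by_cases hmsg : msgRest = []
  · rw [altGo]
    simp [hmsg, pyGroup_nil, updateGo]
  · rw [altGo, dif_neg (by push Not; exact ⟨hmsg, by omega⟩)]
    rw [pyGroup_cons msgRest bsize hb hmsg]
    rw [PySem.List.slice_to msgRest (by omega), PySem.List.slice_from msgRest (by omega)]
    have hflat : (pyGroup (msgRest.drop bsize.toNat) bsize).flatten.length
        = (msgRest.drop bsize.toNat).length := by
      rw [pyGroup_flatten bsize hb]
    rw [block_corr rpl info bsize _ _ ptr ii n_good mres hptr, ← hflat]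
    rcases hab : altBlock rpl info bsize (pyGroup (msgRest.drop bsize.toNat) bsize).flatten.length
        (msgRest.take bsize.toNat) ptr ii n_good mres with ⟨mres', ptr', ii', n_good', early⟩
    cases early
    · dsimp only
      rw [if_neg (by simp : ¬(false = true)), if_neg (by simp : ¬(false = true))]
      have hptr' : ptr' ≤ rpl.length := by
        have := altBlock_ptr_le rpl info bsize
          (pyGroup (msgRest.drop bsize.toNat) bsize).flatten.length
          (msgRest.take bsize.toNat) ptr ii n_good mres hptr
        rw [hab] at this; exact this
      have hlen : (msgRest.drop bsize.toNat).length < msgRest.length := by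
        simp only [List.length_drop]
        have : msgRest.length ≠ 0 := by simp [List.length_eq_zero_iff, hmsg]
        omega
      exact go_corr rpl info bsize hb (msgRest.drop bsize.toNat) ptr' ii' n_good' mres' hptr'
    · dsimp only
      rw [if_pos rfl, if_pos rfl]
termination_by msgRest.length

-- PySem.List.count of none = countP (· == none)
theorem count_none_eq (g : List (Option Int)) :
    (PySem.List.count g none : Nat) = g.countP (fun x => x == none) := by
  rw [PySem.List.count_eq, List.count]

-- B's _counts = A's group-then-count
theorem counts_corr (half : Int) (hh : 1 ≤ half) (mres : List (Option Int)) :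
    altCounts half mres =
      (pyGroup mres half).map (fun g => ((g.countP (fun x => x == none) : Nat) : Int)) := by
  by_cases hm : mres = []
  · rw [altCounts]
    simp [hm, pyGroup_nil]
  · rw [altCounts, dif_neg (by exact fun h => h.elim hm (by omega))]
    rw [pyGroup_cons mres half hh hm, PySem.List.slice_to mres (by omega),
      PySem.List.slice_from mres (by omega), List.map_cons, count_none_eq]
    have hlen : (mres.drop half.toNat).length < mres.length := by
      simp only [List.length_drop]
      have : mres.length ≠ 0 := by simp [List.length_eq_zero_iff, hm]
      omega
    rw [counts_corr half hh (mres.drop half.toNat)]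
termination_by mres.length

-- ===== VERDICT (by name: the statement is the Claim_ definition above) =====
theorem update_spec : Claim_equal_update := by
  intro msg rpl info bsize _ hpre
  unfold Spec_update update update_alt
  have h2 : (2:Int) ≤ bsize := hpre
  have hb : (1:Int) ≤ bsize := by omega
  have hhalf : (1:Int) ≤ PySem.Int.floordiv bsize 2 := by
    rw [PySem.Int.floordiv_eq_ediv_of_pos (by omega)]
    omega
  rw [go_corr rpl info bsize hb msg 0 0 0 [] (by omega)]
  simp only [List.drop_zero]
  rw [counts_corr _ hhalf]
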